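-- pv_equiv track=rewrite | github.com/newcanvas/HSP | 28z/z28.py | Keymaker
-- ===== SOURCE A (Python) =====
-- def Keymaker(k: int) -> str:
--
--     doors = []
--     for i in range(k):
--         doors.append(False)
--
--     for i in range(k):
--         for j in range(k):
--             if (j+1) % (i+1) == 0:
--                 doors[j] = not doors[j]
--
--     result = "".join(list(map(str, map(int, doors))))
--
--     return result
-- ===== SOURCE B (Python) =====
-- def Keymaker(k: int) -> str:
--     # A door ends open iff its 1-based number has an odd number of divisors,
--     # i.e. iff it is a perfect square: mark just the squares, O(k).
--     doors = ["0"] * k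
--     s = 1
--     while s * s <= k:
--         doors[s * s - 1] = "1"
--         s += 1
--     return "".join(doors)
-- ===== Notes on version B (the rewrite author's own statement) =====
-- stated objective: faster
-- what changed: Replaces the O(k^2) double loop that toggles every door by every divisor with a direct O(k) construction that marks exactly the perfect-square doors (a door stays open iff its number has an odd divisor count, i.e. is a square).
import Mathlib
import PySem

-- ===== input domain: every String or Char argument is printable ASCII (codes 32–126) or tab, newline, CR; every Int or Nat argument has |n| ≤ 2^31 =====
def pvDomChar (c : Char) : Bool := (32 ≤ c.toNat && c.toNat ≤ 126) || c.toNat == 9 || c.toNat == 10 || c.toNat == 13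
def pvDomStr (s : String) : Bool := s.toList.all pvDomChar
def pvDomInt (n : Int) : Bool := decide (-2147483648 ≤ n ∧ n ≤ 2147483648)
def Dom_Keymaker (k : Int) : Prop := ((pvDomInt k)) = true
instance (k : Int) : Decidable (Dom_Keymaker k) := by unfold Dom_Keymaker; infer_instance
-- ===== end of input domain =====

-- B replaces A's O(k^2) divisor-toggling double loop by directly marking the perfect-square doors (O(k)).


-- ===== PORT A =====
-- 'for i in range(k): doors.append(False)'
def buildDoors (k : Int) : List Bool :=
  (PySem.List.pyRange 0 k 1).foldl (fun d _ => d ++ [false]) []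

-- the nested 'for i ... for j ...' toggling loop
def toggleLoop (k : Int) (doors : List Bool) : List Bool :=
  (PySem.List.pyRange 0 k 1).foldl (fun d i =>
    (PySem.List.pyRange 0 k 1).foldl (fun d j =>
      if PySem.Int.mod (j + 1) (i + 1) == 0 then
        d.set j.toNat (!(PySem.List.pyGetD d j false))
      else d) d) doors

def Keymaker (k : Int) : String :=
  PySem.Str.join ""
    ((toggleLoop k (buildDoors k)).map (fun b => PySem.Int.toStr (if b then 1 else 0)))

-- ===== PORT B =====
-- the 'while s * s <= k' loop of Source B
def markSquares (k : Int) (s : Nat) (doors : List String) : List String :=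
  if h : ((s * s : Nat) : Int) ≤ k then
    markSquares k (s + 1) (doors.set (s * s - 1) "1")
  else doors
termination_by k.toNat + 1 - s
decreasing_by
  have h1 : s * s ≤ k.toNat := by omega
  rcases Nat.eq_zero_or_pos s with hs | hs
  · omega
  · have : s ≤ s * s := Nat.le_mul_of_pos_right s hs
    omega

def Keymaker_alt (k : Int) : String :=
  let doors := List.replicate k.toNat "0"
  let doors := markSquares k 1 doors
  PySem.Str.join "" doors

-- ===== PRECONDITION & SPEC =====
def Spec_Keymaker (k : Int) (out : String) : Prop := out = Keymaker_alt k
instance (k : Int) (out : String) : Decidable (Spec_Keymaker k out) := by unfold Spec_Keymaker; infer_instance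

-- ===== CLAIM (what is proved, stated in full; the proofs are below) =====
def Claim_equal_Keymaker : Prop := ∀ (k : Int), Dom_Keymaker k → Spec_Keymaker k (Keymaker k)

-- ===== LEMMAS AND PROOFS =====

-- the common value both programs compute: door j is '1' iff j+1 is a perfect square
def doorChars (n : Nat) : List Char :=
  (List.range n).map (fun j => if Nat.sqrt (j + 1) * Nat.sqrt (j + 1) = j + 1 then '1' else '0')

-- A's inner loop, as a fold over Nat indices
def toggleFold (p : Nat → Bool) (m : Nat) (d : List Bool) : List Bool :=
  (List.range m).foldl (fun d j => if p j then d.set j (!d.getD j false) else d) d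

theorem length_toggleFold (p : Nat → Bool) (m : Nat) (d : List Bool) :
    (toggleFold p m d).length = d.length := by
  induction m with
  | zero => simp [toggleFold]
  | succ m ih =>
    rw [toggleFold, List.range_succ, List.foldl_append, List.foldl_cons, List.foldl_nil]
    rw [show (List.range m).foldl (fun d j => if p j then d.set j (!d.getD j false) else d) d
          = toggleFold p m d from rfl]
    by_cases hp : p m <;> simp [hp, ih]

theorem getElem?_toggleFold (p : Nat → Bool) (m : Nat) (d : List Bool) (j : Nat) :
    (toggleFold p m d)[j]? = if j < m ∧ p j then (d[j]?).map (fun b => !b) else d[j]? := by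
  induction m with
  | zero => simp [toggleFold]
  | succ m ih =>
    rw [toggleFold, List.range_succ, List.foldl_append, List.foldl_cons, List.foldl_nil]
    rw [show (List.range m).foldl (fun d j => if p j then d.set j (!d.getD j false) else d) d
          = toggleFold p m d from rfl]
    by_cases hp : p m
    · simp only [hp, if_true]
      by_cases hj : j = m
      · obtain rfl := hj
        have hcur : (toggleFold p j d)[j]? = d[j]? := by rw [ih]; simp
        by_cases hlt : j < d.length
        · rw [List.getElem?_set_self (by rw [length_toggleFold]; exact hlt)]
          have hd : d[j]? = some d[j] := List.getElem?_eq_getElem hlt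
          have hgd : (toggleFold p j d).getD j false = d[j] := by
            rw [List.getD_eq_getElem?_getD, hcur, hd]; rfl
          rw [hgd, hd]
          simp [hp]
        · have h1 : d[j]? = none := List.getElem?_eq_none (by omega)
          have hset : (toggleFold p j d).set j (!(toggleFold p j d).getD j false)
              = toggleFold p j d := by
            apply List.set_eq_of_length_le
            rw [length_toggleFold]; omega
          rw [hset, hcur, h1]
          simp
      · rw [List.getElem?_set_ne (fun h => hj h.symm)]
        rw [ih]
        by_cases h1 : j < m
        · have h2 : j < m + 1 := by omega
          simp [h1, h2]
        · have h2 : ¬ (j < m + 1) := by omega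
          simp [h1, h2]
    · have hp' : p m = false := by simpa using hp
      simp only [hp', Bool.false_eq_true, if_false]
      rw [ih]
      by_cases h1 : j < m
      · have h2 : j < m + 1 := by omega
        simp [h1, h2]
      · by_cases h2 : j = m
        · obtain rfl := h2
          simp [hp']
        · have h3 : ¬ (j < m + 1) := by omega
          simp [h1, h3]

theorem getElem?_outerFold (q : Nat → Nat → Bool) (n m : Nat) (d0 : List Bool) (j : Nat) :
    ((List.range m).foldl (fun d i => toggleFold (q i) n d) d0)[j]? =
      (d0[j]?).map (fun b =>
        if Odd ((List.range m).countP (fun i => decide (j < n) && q i j)) then !b else b) := by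
  induction m with
  | zero =>
    simp only [List.range_zero, List.foldl_nil, List.countP_nil]
    cases d0[j]? <;> simp
  | succ m ih =>
    rw [List.range_succ, List.foldl_append, List.foldl_cons, List.foldl_nil]
    rw [getElem?_toggleFold, ih]
    rw [List.countP_append, List.countP_cons, List.countP_nil]
    by_cases hn : j < n
    · have hfun : (fun i => decide (j < n) && q i j) = fun i => q i j := by
        funext i; simp [hn]
      rw [hfun]
      by_cases hq : q m j
      · simp only [hn, hq, and_true, if_pos, decide_true, Bool.and_true, if_true]
        cases d0[j]? with
        | none => simp
        | some b =>
          simp only [Option.map_some]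
          rcases Nat.even_or_odd (List.countP (fun i => q i j) (List.range m)) with he | ho
          · simp [Nat.odd_add_one, he, Nat.not_odd_iff_even.mpr he]
          · simp [Nat.odd_add_one, ho, Nat.not_even_iff_odd.mpr ho]
      · have hq' : q m j = false := by simpa using hq
        simp [hq']
    · have hc : (decide (j < n) && q m j) = false := by simp [hn]
      simp [hn, hc]

theorem countP_range_divisors (n j : Nat) (hj : j < n) :
    (List.range n).countP (fun i => decide ((i + 1) ∣ (j + 1))) = (Nat.divisors (j + 1)).card := by
  have h1 : (List.range n).countP (fun i => decide ((i + 1) ∣ (j + 1)))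
      = ((Finset.range n).filter (fun i => (i + 1) ∣ (j + 1))).card := by
    simp [Finset.filter, Finset.card, Finset.range, Multiset.range, Multiset.filter,
      List.countP_eq_length_filter]
  rw [h1]
  refine Finset.card_bij' (fun i _ => i + 1) (fun d _ => d - 1) ?hi ?hj ?li ?ri
  case hi =>
    intro i hi
    simp only [Finset.mem_filter, Finset.mem_range] at hi
    exact Nat.mem_divisors.mpr ⟨hi.2, by omega⟩
  case hj =>
    intro d hd
    rw [Nat.mem_divisors] at hd
    have h2 : 1 ≤ d := Nat.pos_of_dvd_of_pos hd.1 (by omega)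
    have h3 : d ≤ j + 1 := Nat.le_of_dvd (by omega) hd.1
    simp only [Finset.mem_filter, Finset.mem_range]
    constructor
    · omega
    · rw [Nat.sub_add_cancel h2]; exact hd.1
  case li => intro i hi; show i + 1 - 1 = i; omega
  case ri =>
    intro d hd
    rw [Nat.mem_divisors] at hd
    have h2 : 1 ≤ d := Nat.pos_of_dvd_of_pos hd.1 (by omega)
    show d - 1 + 1 = d
    omega

-- a door's number has an odd number of divisors iff it is a perfect square
theorem odd_card_divisors_iff (m : Nat) (hm : 0 < m) :
    Odd (Nat.divisors m).card ↔ Nat.sqrt m * Nat.sqrt m = m := by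
  classical
  set s := Nat.divisors m with hs
  have hcard_lt_gt : ((s.filter (fun d => d * d < m)).card)
      = ((s.filter (fun d => m < d * d)).card) := by
    refine Finset.card_bij' (fun d _ => m / d) (fun d _ => m / d) ?hi ?hj ?li ?ri
    case hi =>
      intro d hd
      simp only [Finset.mem_filter, hs, Nat.mem_divisors] at hd ⊢
      obtain ⟨⟨⟨e, he⟩, hm0⟩, hlt⟩ := hd
      have hd0 : 0 < d := by
        rcases Nat.eq_zero_or_pos d with h | h
        · subst h; simp at he; omega
        · exact h
      have hdiv : m / d = e := by rw [he]; exact Nat.mul_div_cancel_left e hd0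
      have hde : d < e := by nlinarith [he]
      have hedvd : e ∣ m := ⟨d, by rw [he]; ring⟩
      refine ⟨⟨hdiv ▸ hedvd, hm0⟩, ?_⟩
      rw [hdiv]; nlinarith [he]
    case hj =>
      intro d hd
      simp only [Finset.mem_filter, hs, Nat.mem_divisors] at hd ⊢
      obtain ⟨⟨⟨e, he⟩, hm0⟩, hlt⟩ := hd
      have hd0 : 0 < d := by
        rcases Nat.eq_zero_or_pos d with h | h
        · subst h; simp at he; omega
        · exact h
      have hdiv : m / d = e := by rw [he]; exact Nat.mul_div_cancel_left e hd0
      have hde : e < d := by nlinarith [he]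
      have hedvd : e ∣ m := ⟨d, by rw [he]; ring⟩
      refine ⟨⟨hdiv ▸ hedvd, hm0⟩, ?_⟩
      rw [hdiv]; nlinarith [he]
    case li =>
      intro d hd
      simp only [Finset.mem_filter, hs, Nat.mem_divisors] at hd
      exact Nat.div_div_self hd.1.1 (by omega)
    case ri =>
      intro d hd
      simp only [Finset.mem_filter, hs, Nat.mem_divisors] at hd
      exact Nat.div_div_self hd.1.1 (by omega)
  have hcard_eq : ((s.filter (fun d => d * d = m)).card)
      = if Nat.sqrt m * Nat.sqrt m = m then 1 else 0 := by
    by_cases hsq : Nat.sqrt m * Nat.sqrt m = m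
    · rw [if_pos hsq]
      have heq : s.filter (fun d => d * d = m) = {Nat.sqrt m} := by
        ext d
        simp only [Finset.mem_filter, Finset.mem_singleton, hs, Nat.mem_divisors]
        constructor
        · rintro ⟨-, hdd⟩
          have hth : Nat.sqrt (d * d) = d := by simpa [pow_two] using Nat.sqrt_eq' d
          rw [hdd] at hth
          omega
        · rintro rfl
          exact ⟨⟨⟨Nat.sqrt m, hsq.symm⟩, by omega⟩, hsq⟩
      rw [heq]; rfl
    · rw [if_neg hsq]
      rw [Finset.card_eq_zero, Finset.filter_eq_empty_iff]
      intro d hd hdd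
      have hth : Nat.sqrt (d * d) = d := by simpa [pow_two] using Nat.sqrt_eq' d
      rw [hdd] at hth
      exact hsq (by rw [hth, hdd])
  have hsplit1 : s.card = (s.filter (fun d => d * d < m)).card
      + (s.filter (fun d => ¬ d * d < m)).card :=
    (Finset.card_filter_add_card_filter_not _).symm
  have hsplit2 : (s.filter (fun d => ¬ d * d < m)).card
      = (s.filter (fun d => d * d = m)).card + (s.filter (fun d => m < d * d)).card := by
    have e1 : s.filter (fun d => d * d = m)
        = (s.filter (fun d => ¬ d * d < m)).filter (fun d => d * d = m) := by
      rw [Finset.filter_filter]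
      apply Finset.filter_congr
      intro d _
      constructor
      · intro h; exact ⟨by omega, h⟩
      · intro h; exact h.2
    have e2 : s.filter (fun d => m < d * d)
        = (s.filter (fun d => ¬ d * d < m)).filter (fun d => ¬ d * d = m) := by
      rw [Finset.filter_filter]
      apply Finset.filter_congr
      intro d _
      constructor
      · intro h; exact ⟨by omega, by omega⟩
      · intro h; omega
    rw [e1, e2]
    exact (Finset.card_filter_add_card_filter_not _).symm
  rw [hsplit1, hsplit2, hcard_eq, ← hcard_lt_gt]
  by_cases hsq : Nat.sqrt m * Nat.sqrt m = m
  · rw [if_pos hsq]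
    simp only [hsq, iff_true]
    exact ⟨(s.filter (fun d => d * d < m)).card, by ring⟩
  · rw [if_neg hsq]
    simp only [hsq, iff_false]
    rintro ⟨t, ht⟩
    omega

theorem cond_mod_eq_decide_dvd (i j : Nat) :
    (PySem.Int.mod ((j:Int) + 1) ((i:Int) + 1) == 0) = decide ((i + 1) ∣ (j + 1)) := by
  have hiff : PySem.Int.mod ((j:Int) + 1) ((i:Int) + 1) = 0 ↔ (i + 1) ∣ (j + 1) := by
    rw [PySem.Int.mod_eq_zero_iff_dvd]
    constructor
    · intro h; exact_mod_cast h
    · intro h; exact_mod_cast h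
  by_cases h : PySem.Int.mod ((j:Int) + 1) ((i:Int) + 1) = 0
  · have hdvd : ((i:Int) + 1) ∣ ((j:Int) + 1) := by exact_mod_cast hiff.mp h
    simp [h, hiff.mp h, hdvd]
  · have h2 : ¬ ((i + 1) ∣ (j + 1)) := fun hd => h (hiff.mpr hd)
    have h3 : ¬ (((i:Int) + 1) ∣ ((j:Int) + 1)) := by
      intro hd; exact h2 (by exact_mod_cast hd)
    simp [h, h2, h3]

theorem keymaker_toList (k : Int) : (Keymaker k).toList = doorChars k.toNat := by
  have hrange : PySem.List.pyRange 0 k 1 = (List.range k.toNat).map (fun t : Nat => (t : Int)) := by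
    rw [PySem.List.pyRange_one]; simp
  have hbuild : buildDoors k = List.replicate k.toNat false := by
    rw [buildDoors, PySem.List.foldl_append_singleton_eq_map]
    simp [hrange, List.map_const']
  have htoggle : toggleLoop k (buildDoors k)
      = (List.range k.toNat).foldl
          (fun d i => toggleFold (fun j => decide ((i + 1) ∣ (j + 1))) k.toNat d)
          (List.replicate k.toNat false) := by
    rw [toggleLoop, hbuild, hrange, List.foldl_map]
    congr 1
    funext d i
    rw [List.foldl_map, toggleFold]
    congr 1
    funext d' j
    rw [cond_mod_eq_decide_dvd, Int.toNat_natCast, PySem.List.pyGetD_natCast]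
  have hfinal : toggleLoop k (buildDoors k)
      = (List.range k.toNat).map
          (fun j => if Nat.sqrt (j + 1) * Nat.sqrt (j + 1) = j + 1 then true else false) := by
    rw [htoggle]
    apply List.ext_getElem?
    intro j
    rw [getElem?_outerFold]
    by_cases hj : j < k.toNat
    · have hrep : (List.replicate k.toNat (false : Bool))[j]? = some false := by
        rw [List.getElem?_replicate]; simp [hj]
      have hrhs : ((List.range k.toNat).map
            (fun j => if Nat.sqrt (j + 1) * Nat.sqrt (j + 1) = j + 1 then true else false))[j]?
          = some (if Nat.sqrt (j + 1) * Nat.sqrt (j + 1) = j + 1 then true else false) := by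
        rw [List.getElem?_map, List.getElem?_range hj]
        rfl
      rw [hrep, hrhs, Option.map_some]
      have hfun : (fun i => decide (j < k.toNat) && decide ((i + 1) ∣ (j + 1)))
          = fun i => decide ((i + 1) ∣ (j + 1)) := by
        funext i; simp [hj]
      rw [hfun, countP_range_divisors k.toNat j hj]
      by_cases h : Nat.sqrt (j + 1) * Nat.sqrt (j + 1) = j + 1
      · simp [h, (odd_card_divisors_iff (j + 1) (by omega)).mpr h]
      · have h2 : ¬ Odd (Nat.divisors (j + 1)).card :=
          fun ho => h ((odd_card_divisors_iff (j + 1) (by omega)).mp ho)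
        simp [h, h2]
    · rw [List.getElem?_eq_none (l := List.replicate k.toNat (false : Bool))
          (by simpa using Nat.le_of_not_lt hj)]
      rw [List.getElem?_eq_none (by simpa using Nat.le_of_not_lt hj)]
      rfl
  show (PySem.Str.join "" ((toggleLoop k (buildDoors k)).map
      (fun b => PySem.Int.toStr (if b then 1 else 0)))).toList = _
  rw [hfinal, PySem.Str.toList_join]
  have h1 : (((List.range k.toNat).map
        (fun j => if Nat.sqrt (j + 1) * Nat.sqrt (j + 1) = j + 1 then true else false)).map
        (fun b => PySem.Int.toStr (if b then 1 else 0))).map String.toList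
      = (doorChars k.toNat).map (fun c => [c]) := by
    rw [doorChars, List.map_map, List.map_map, List.map_map]
    apply List.map_congr_left
    intro j _
    by_cases h : Nat.sqrt (j + 1) * Nat.sqrt (j + 1) = j + 1 <;> simp [h] <;> rfl
  rw [h1]
  rw [show ("" : String).toList = [] from rfl, PySem.Chars.join_nil_singletons]

theorem length_markSquares (k : Int) (s : Nat) (d : List String) :
    (markSquares k s d).length = d.length := by
  fun_induction markSquares with
  | case1 a b hg ih => rw [ih]; simp
  | case2 a b hg => rfl

theorem getElem?_markSquares (k : Int) (s : Nat) (d : List String) (hs : 1 ≤ s) (j : Nat)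
    (hj : j < d.length) :
    (markSquares k s d)[j]? =
      if Nat.sqrt (j+1) * Nat.sqrt (j+1) = j + 1 ∧ s ≤ Nat.sqrt (j+1) ∧ ((j+1 : Nat) : Int) ≤ k
      then some "1" else d[j]? := by
  revert hs hj
  fun_induction markSquares with
  | case1 a b hg ih =>
    intro hs hj
    rw [ih (by omega) (by simpa using hj)]
    have hb : b[j]? = some b[j] := List.getElem?_eq_getElem hj
    by_cases hC : Nat.sqrt (j+1) * Nat.sqrt (j+1) = j + 1 ∧ (a+1) ≤ Nat.sqrt (j+1) ∧ ((j+1 : Nat) : Int) ≤ k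
    · rw [if_pos hC, if_pos ⟨hC.1, by omega, hC.2.2⟩]
    · rw [if_neg hC]
      by_cases hC0 : Nat.sqrt (j+1) * Nat.sqrt (j+1) = j + 1 ∧ a ≤ Nat.sqrt (j+1) ∧ ((j+1 : Nat) : Int) ≤ k
      · obtain ⟨h1, h2, h3⟩ := hC0
        have hr : Nat.sqrt (j+1) = a := by
          rcases Nat.lt_or_ge (Nat.sqrt (j+1)) (a+1) with h | h
          · omega
          · exact absurd ⟨h1, by omega, h3⟩ hC
        have hja : j = a * a - 1 := by rw [hr] at h1; omega
        rw [if_pos ⟨h1, h2, h3⟩, hja]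
        rw [List.getElem?_set_self (by omega)]
      · rw [if_neg hC0]
        have hne : a * a - 1 ≠ j := by
          intro hEq
          apply hC0
          have haa : 1 ≤ a * a := Nat.one_le_iff_ne_zero.mpr (by positivity)
          have hj1 : j + 1 = a * a := by omega
          have hra : Nat.sqrt (j+1) = a := by rw [hj1]; simpa [pow_two] using Nat.sqrt_eq' a
          exact ⟨by rw [hra, hj1], by rw [hra], by rw [hj1]; exact_mod_cast hg⟩
        rw [List.getElem?_set_ne hne]
  | case2 a b hg =>
    intro hs hj
    rw [if_neg]
    rintro ⟨h1, h2, h3⟩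
    have h4 : a * a ≤ (j+1) := by
      calc a * a ≤ Nat.sqrt (j+1) * Nat.sqrt (j+1) := Nat.mul_le_mul h2 h2
        _ = j + 1 := h1
    have h5 : ((a*a : Nat) : Int) ≤ ((j+1 : Nat) : Int) := by exact_mod_cast h4
    omega

theorem keymaker_alt_toList (k : Int) : (Keymaker_alt k).toList = doorChars k.toNat := by
  have hlist : markSquares k 1 (List.replicate k.toNat "0")
      = (List.range k.toNat).map
          (fun j => if Nat.sqrt (j + 1) * Nat.sqrt (j + 1) = j + 1 then "1" else "0") := by
    apply List.ext_getElem?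
    intro j
    by_cases hj : j < k.toNat
    · rw [getElem?_markSquares k 1 _ le_rfl j (by simpa using hj)]
      have hrhs : ((List.range k.toNat).map
          (fun j => if Nat.sqrt (j + 1) * Nat.sqrt (j + 1) = j + 1 then "1" else "0"))[j]?
          = some (if Nat.sqrt (j + 1) * Nat.sqrt (j + 1) = j + 1 then "1" else "0") := by
        rw [List.getElem?_map, List.getElem?_range hj]
        rfl
      rw [hrhs]
      have hc2 : 1 ≤ Nat.sqrt (j + 1) := Nat.sqrt_pos.mpr (by omega)
      have hc3 : ((j + 1 : Nat) : Int) ≤ k := by omega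
      by_cases h1 : Nat.sqrt (j + 1) * Nat.sqrt (j + 1) = j + 1
      · rw [if_pos ⟨h1, hc2, hc3⟩, if_pos h1]
      · rw [if_neg (fun h => h1 h.1), if_neg h1]
        rw [List.getElem?_replicate]
        simp [hj]
    · rw [List.getElem?_eq_none (l := markSquares k 1 (List.replicate k.toNat "0"))
          (by rw [length_markSquares]; simpa using Nat.le_of_not_lt hj)]
      rw [List.getElem?_eq_none (by simpa using Nat.le_of_not_lt hj)]
  show (PySem.Str.join "" (markSquares k 1 (List.replicate k.toNat "0"))).toList = _
  rw [hlist, PySem.Str.toList_join]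
  have h1 : ((List.range k.toNat).map
        (fun j => if Nat.sqrt (j + 1) * Nat.sqrt (j + 1) = j + 1 then "1" else "0")).map
        String.toList
      = (doorChars k.toNat).map (fun c => [c]) := by
    rw [doorChars, List.map_map, List.map_map]
    apply List.map_congr_left
    intro j _
    by_cases h : Nat.sqrt (j + 1) * Nat.sqrt (j + 1) = j + 1 <;> simp [h]
  rw [h1]
  rw [show ("" : String).toList = [] from rfl, PySem.Chars.join_nil_singletons]

-- ===== VERDICT (by name: the statement is the Claim_ definition above) =====
theorem Keymaker_spec : Claim_equal_Keymaker := by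
  intro k _
  show Keymaker k = Keymaker_alt k
  apply String.toList_inj.mp
  rw [keymaker_toList, keymaker_alt_toList]
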